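-- pv_equiv track=rewrite | github.com/Sh1tFXXK/weather-smarter | backend/agent/llm_router.py | _normalize_memory
-- ===== SOURCE A (Python) =====
-- from typing import Any, Dict, List, Optional
--
-- def _normalize_memory(memory: Optional[List[Dict[str, Any]]]) -> List[Dict[str, str]]:
--     if not memory:
--         return []
--     result: List[Dict[str, str]] = []
--     for item in memory:
--         role = item.get("role", "user")
--         content = item.get("content", "")
--         if content:
--             result.append({"role": role, "content": content})
--     return result[-6:]
-- ===== SOURCE B (Python) =====
-- from typing import Any, Dict, List, Optional
--
-- def _normalize_memory(memory: Optional[List[Dict[str, Any]]]) -> List[Dict[str, str]]: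
--     if not memory:
--         return []
--     out: List[Dict[str, str]] = []
--     for item in reversed(memory):
--         content = item.get("content", "")
--         if content:
--             out.append({"role": item.get("role", "user"), "content": content})
--             if len(out) == 6:
--                 break
--     out.reverse()
--     return out
-- ===== Notes on version B (the rewrite author's own statement) =====
-- stated objective: alternative
-- what changed: Replaces forward filter-all-then-slice[-6:] with a reverse bounded scan that collects at most 6 non-empty entries and breaks early, then reverses the accumulator.
import Mathlib
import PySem

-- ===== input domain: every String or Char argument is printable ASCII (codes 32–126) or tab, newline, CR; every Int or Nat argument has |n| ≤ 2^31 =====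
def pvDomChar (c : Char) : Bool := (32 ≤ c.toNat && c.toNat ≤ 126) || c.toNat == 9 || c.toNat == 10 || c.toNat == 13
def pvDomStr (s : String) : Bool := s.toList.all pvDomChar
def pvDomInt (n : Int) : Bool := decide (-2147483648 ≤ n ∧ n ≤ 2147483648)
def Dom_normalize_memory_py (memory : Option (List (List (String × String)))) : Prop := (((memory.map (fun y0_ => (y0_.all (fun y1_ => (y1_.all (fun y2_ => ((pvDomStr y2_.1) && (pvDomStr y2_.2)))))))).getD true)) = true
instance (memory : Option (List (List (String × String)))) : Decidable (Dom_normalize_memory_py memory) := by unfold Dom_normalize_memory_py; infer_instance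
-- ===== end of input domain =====

-- B replaces A's forward filter-then-slice[-6:] with a reverse bounded scan (collect ≤ 6, break early) plus a final reversal; same return value, stated as exact equivalence.


-- ===== PORT A =====
-- item.get(k, d) on a Python dict ported as first-match lookup on the association list
def pvGet (item : List (String × String)) (k d : String) : String :=
  (PySem.Dict.mk item).getD k d

-- literal transliteration: guard 'if not memory', forward loop appending kept entries, then result[-6:]
def normalize_memory_py (memory : Option (List (List (String × String)))) : List (List (String × String)) :=
  match memory with
  | none => []
  | some mem =>
    if mem = [] then []
    else
      let result := mem.foldl (fun acc item =>
        let role := pvGet item "role" "user"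
        let content := pvGet item "content" ""
        if content ≠ "" then acc ++ [[("role", role), ("content", content)]] else acc) []
      PySem.List.slice result (some (-6)) none

-- ===== PORT B =====
-- reverse scan: append kept entry, stop as soon as 6 collected; finally reverse the accumulator
def normalize_memory_py_altLoop : List (List (String × String)) → List (List (String × String)) → List (List (String × String))
  | [], out => out
  | item :: rest, out =>
    let content := pvGet item "content" ""
    if content ≠ "" then
      let out' := out ++ [[("role", pvGet item "role" "user"), ("content", content)]]
      if out'.length = 6 then out' else normalize_memory_py_altLoop rest out'
    else normalize_memory_py_altLoop rest out

def normalize_memory_py_alt (memory : Option (List (List (String × String)))) : List (List (String × String)) :=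
  match memory with
  | none => []
  | some mem =>
    if mem = [] then []
    else (normalize_memory_py_altLoop mem.reverse []).reverse

-- ===== PRECONDITION & SPEC =====
def Spec_normalize_memory_py (memory : Option (List (List (String × String)))) (out : List (List (String × String))) : Prop := out = normalize_memory_py_alt memory
instance (memory : Option (List (List (String × String)))) (out : List (List (String × String))) : Decidable (Spec_normalize_memory_py memory out) := by unfold Spec_normalize_memory_py; infer_instance

-- ===== CLAIM (what is proved, stated in full; the proofs are below) =====
def Claim_equal_normalize_memory_py : Prop := ∀ (memory : Option (List (List (String × String)))), Dom_normalize_memory_py memory → Spec_normalize_memory_py memory (normalize_memory_py memory)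

-- ===== LEMMAS AND PROOFS =====

-- the kept-entries list both programs are about
def pvKept (mem : List (List (String × String))) : List (List (String × String)) :=
  mem.filterMap (fun item =>
    let content := pvGet item "content" ""
    if content ≠ "" then some [("role", pvGet item "role" "user"), ("content", content)] else none)

theorem pvKept_cons (item : List (String × String)) (rest : List (List (String × String))) :
    pvKept (item :: rest) =
      (if pvGet item "content" "" ≠ "" then
        [("role", pvGet item "role" "user"), ("content", pvGet item "content" "")] :: pvKept rest
      else pvKept rest) := by
  simp only [pvKept, List.filterMap_cons]
  split <;> simp_all

-- A's foldl builds exactly pvKept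
theorem foldl_eq_kept (mem : List (List (String × String))) (acc : List (List (String × String))) :
    mem.foldl (fun acc item =>
        let role := pvGet item "role" "user"
        let content := pvGet item "content" ""
        if content ≠ "" then acc ++ [[("role", role), ("content", content)]] else acc) acc
      = acc ++ pvKept mem := by
  induction mem generalizing acc with
  | nil => simp [pvKept]
  | cons item rest ih =>
    rw [List.foldl_cons, ih, pvKept_cons]
    by_cases hc : pvGet item "content" "" = "" <;> simp [hc]

-- B's loop collects the first (6 - out.length) kept entries
theorem altLoop_eq_take (l : List (List (String × String))) (out : List (List (String × String)))
    (h : out.length < 6) :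
    normalize_memory_py_altLoop l out = out ++ (pvKept l).take (6 - out.length) := by
  induction l generalizing out with
  | nil => simp [normalize_memory_py_altLoop, pvKept]
  | cons item rest ih =>
    rw [normalize_memory_py_altLoop, pvKept_cons]
    by_cases hc : pvGet item "content" "" = ""
    · simp only [hc, ne_eq, not_true_eq_false, if_false]
      exact ih _ h
    · simp only [hc, ne_eq, not_false_eq_true, if_true, List.length_append, List.length_cons,
        List.length_nil, Nat.zero_add]
      by_cases h6 : out.length + 1 = 6
      · have h1 : 6 - out.length = 1 := by omega
        rw [if_pos h6, h1, List.take_succ_cons, List.take_zero]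
      · have hlt : (out ++ [[("role", pvGet item "role" "user"), ("content", pvGet item "content" "")]]).length < 6 := by
          simp; omega
        have h2 : 6 - out.length = (6 - (out.length + 1)) + 1 := by omega
        rw [if_neg h6, ih _ hlt, h2, List.take_succ_cons]
        simp

theorem drop_eq_reverse_take (l : List (List (String × String))) (n : Nat) :
    l.drop (l.length - n) = (l.reverse.take n).reverse := by
  rw [List.take_reverse]
  simp

theorem ports_agree (memory : Option (List (List (String × String)))) :
    normalize_memory_py memory = normalize_memory_py_alt memory := by
  cases memory with
  | none => rfl
  | some mem =>
    simp only [normalize_memory_py, normalize_memory_py_alt]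
    split
    · rfl
    · rw [foldl_eq_kept, altLoop_eq_take _ _ (by simp)]
      rw [PySem.List.slice_from_neg_ofNat _ 6 (by omega)]
      simp only [List.nil_append, List.length_nil, Nat.sub_zero]
      rw [drop_eq_reverse_take]
      have : pvKept mem.reverse = (pvKept mem).reverse := by
        simp [pvKept, List.filterMap_reverse]
      rw [this]

-- ===== VERDICT (by name: the statement is the Claim_ definition above) =====
theorem normalize_memory_py_spec : Claim_equal_normalize_memory_py := by
  intro memory _
  unfold Spec_normalize_memory_py
  exact ports_agree memory
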